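-- pv_equiv track=rewrite | github.com/SyedZawwarAhmed/Reacher | src/email_finder.py | _rank_emails
-- ===== SOURCE A (Python) =====
-- COMMON_HR_PREFIXES = [
--     "hr", "careers", "jobs", "hiring", "recruiting",
--     "recruitment", "talent", "apply", "career", "people",
-- ]
--
-- def _rank_emails(emails: list[str]) -> list[str]:
--     """Rank emails by likelihood of being an HR/application email.
--
--     HR-like prefixes get priority, then generic ones.
--     """
--     if not emails:
--         return []
--
--     hr_emails = []
--     other_emails = []
--
--     for email in emails:
--         prefix = email.split("@")[0].lower()
--         if any(hr in prefix for hr in COMMON_HR_PREFIXES):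
--             hr_emails.append(email)
--         else:
--             other_emails.append(email)
--
--     return hr_emails + other_emails
-- ===== SOURCE B (Python) =====
-- COMMON_HR_PREFIXES = [
--     "hr", "careers", "jobs", "hiring", "recruiting",
--     "recruitment", "talent", "apply", "career", "people",
-- ]
--
-- def _rank_emails(emails: list[str]) -> list[str]:
--     """Rank emails HR-first via one stable sort on a 0/1 key."""
--     def key(email):
--         local = email.split("@")[0].lower()
--         return 0 if any(hr in local for hr in COMMON_HR_PREFIXES) else 1
--     return sorted(emails, key=key)
-- ===== Notes on version B (the rewrite author's own statement) =====
-- stated objective: idiomatic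
-- what changed: Replaces the two-accumulator partition loop (hr list, other list, then concatenation) with a single stable sort on a binary key (0 for HR-prefixed local parts, 1 otherwise); stability preserves the within-group order.
import Mathlib
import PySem

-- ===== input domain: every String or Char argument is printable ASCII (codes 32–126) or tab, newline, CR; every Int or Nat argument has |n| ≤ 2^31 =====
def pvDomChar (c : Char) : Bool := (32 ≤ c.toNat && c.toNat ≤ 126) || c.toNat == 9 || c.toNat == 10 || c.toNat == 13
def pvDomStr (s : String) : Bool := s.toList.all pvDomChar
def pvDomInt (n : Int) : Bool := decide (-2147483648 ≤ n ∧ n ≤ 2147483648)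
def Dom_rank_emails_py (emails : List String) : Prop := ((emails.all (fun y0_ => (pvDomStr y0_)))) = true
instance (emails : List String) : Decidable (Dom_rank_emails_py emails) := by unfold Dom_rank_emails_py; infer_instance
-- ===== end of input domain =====

-- B replaces A's two-accumulator partition loop by a single stable sort on a 0/1 key (idiomatic).

-- ===== PORT A =====
def pvHrPrefixes : List String :=
  ["hr", "careers", "jobs", "hiring", "recruiting",
   "recruitment", "talent", "apply", "career", "people"]

-- email.split("@")[0]: split? with the nonempty separator "@" is always `some` of a
-- nonempty list, so `.getD []` and `[0]` as `.headD ""` are exact here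
def pvIsHR (email : String) : Bool :=
  let pre := PySem.Str.lower (((PySem.Str.split? email "@").getD []).headD "")
  pvHrPrefixes.any (fun hr => PySem.Str.isIn hr pre)

def rank_emails_py (emails : List String) : List String :=
  if emails = [] then []
  else
    let done := emails.foldl
      (fun (acc : List String × List String) email =>
        if pvIsHR email then (acc.1 ++ [email], acc.2) else (acc.1, acc.2 ++ [email]))
      ([], [])
    done.1 ++ done.2

-- ===== PORT B =====
def pvHrKey (email : String) : Nat :=
  let loc := PySem.Str.lower (((PySem.Str.split? email "@").getD []).headD "")
  if pvHrPrefixes.any (fun hr => PySem.Str.isIn hr loc) then 0 else 1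

def rank_emails_py_alt (emails : List String) : List String :=
  PySem.List.sorted emails (fun e => pvHrKey e) false

-- ===== PRECONDITION & SPEC =====
def Spec_rank_emails_py (emails : List String) (out : List String) : Prop := out = rank_emails_py_alt emails
instance (emails : List String) (out : List String) : Decidable (Spec_rank_emails_py emails out) := by unfold Spec_rank_emails_py; infer_instance

-- ===== CLAIM (what is proved, stated in full; the proofs are below) =====
def Claim_equal_rank_emails_py : Prop := ∀ (emails : List String), Dom_rank_emails_py emails → Spec_rank_emails_py emails (rank_emails_py emails)

-- ===== LEMMAS AND PROOFS =====

theorem pvHrKey_eq (e : String) : pvHrKey e = if pvIsHR e then 0 else 1 := rfl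

theorem pv_insertBy_skip (b : String → String → Bool) (x : String) (h t : List String)
    (hh : ∀ y ∈ h, b x y = false) :
    PySem.List.insertBy b x (h ++ t) = h ++ PySem.List.insertBy b x t := by
  induction h with
  | nil => rfl
  | cons y ys ih =>
    have hy : b x y = false := hh y (by simp)
    simp only [List.cons_append]
    show (if b x y then x :: y :: (ys ++ t) else y :: PySem.List.insertBy b x (ys ++ t))
        = y :: (ys ++ PySem.List.insertBy b x t)
    rw [hy, ih (fun z hz => hh z (by simp [hz]))]
    rfl

-- loop invariant of B's stable insertion sort with a binary key
theorem pv_inv (xs : List String) (h t : List String)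
    (hh : ∀ y ∈ h, pvIsHR y = true) (ht : ∀ y ∈ t, pvIsHR y = false) :
    xs.foldl (fun acc x =>
        PySem.List.insertBy (fun a b => decide (pvHrKey a < pvHrKey b)) x acc) (h ++ t)
    = (h ++ xs.filter pvIsHR) ++ (t ++ xs.filter (fun e => !pvIsHR e)) := by
  induction xs generalizing h t with
  | nil => simp
  | cons x xs ih =>
    by_cases hx : pvIsHR x = true
    · have hkx : pvHrKey x = 0 := by rw [pvHrKey_eq, hx]; rfl
      have step : PySem.List.insertBy (fun a b => decide (pvHrKey a < pvHrKey b)) x (h ++ t)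
          = (h ++ [x]) ++ t := by
        rw [pv_insertBy_skip _ _ _ _ (fun y hy => by simp [hkx, pvHrKey_eq, hh y hy])]
        cases t with
        | nil => simp [PySem.List.insertBy]
        | cons z zs =>
          have hz : pvHrKey z = 1 := by rw [pvHrKey_eq, ht z (by simp)]; rfl
          show h ++ (if decide (pvHrKey x < pvHrKey z) then x :: z :: zs
              else z :: PySem.List.insertBy _ x zs) = (h ++ [x]) ++ (z :: zs)
          simp [hkx, hz]
      have hh' : ∀ y ∈ h ++ [x], pvIsHR y = true := by
        intro y hy
        rcases List.mem_append.1 hy with hy | hy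
        · exact hh y hy
        · simp at hy; subst hy; exact hx
      rw [List.foldl_cons, step, ih (h ++ [x]) t hh' ht]
      simp [List.filter_cons, hx]
    · have hx' : pvIsHR x = false := by simpa using hx
      have hkx : pvHrKey x = 1 := by rw [pvHrKey_eq, hx']; rfl
      have step : PySem.List.insertBy (fun a b => decide (pvHrKey a < pvHrKey b)) x (h ++ t)
          = (h ++ t) ++ [x] := by
        apply PySem.List.insertBy_of_forall_not_before
        intro y hy
        rcases List.mem_append.1 hy with hy | hy
        · have : pvHrKey y = 0 := by rw [pvHrKey_eq, hh y hy]; rfl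
          simp [hkx, this]
        · have : pvHrKey y = 1 := by rw [pvHrKey_eq, ht y hy]; rfl
          simp [hkx, this]
      have ht' : ∀ y ∈ t ++ [x], pvIsHR y = false := by
        intro y hy
        rcases List.mem_append.1 hy with hy | hy
        · exact ht y hy
        · simp at hy; subst hy; exact hx'
      rw [List.foldl_cons, step, List.append_assoc, ih h (t ++ [x]) hh ht']
      simp [List.filter_cons, hx']

-- A's loop computes the two filters
theorem pv_partition (xs : List String) (a b : List String) :
    xs.foldl (fun (acc : List String × List String) email =>
        if pvIsHR email then (acc.1 ++ [email], acc.2) else (acc.1, acc.2 ++ [email])) (a, b)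
    = (a ++ xs.filter pvIsHR, b ++ xs.filter (fun e => !pvIsHR e)) := by
  induction xs generalizing a b with
  | nil => simp
  | cons x xs ih =>
    by_cases hx : pvIsHR x = true
    · simp [List.foldl_cons, hx, ih]
    · have hx' : pvIsHR x = false := by simpa using hx
      simp [List.foldl_cons, hx', ih]

theorem pv_alt_eq (emails : List String) :
    rank_emails_py_alt emails = emails.filter pvIsHR ++ emails.filter (fun e => !pvIsHR e) := by
  unfold rank_emails_py_alt
  rw [PySem.List.sorted_eq_foldl_insertBy]
  have := pv_inv emails [] [] (by simp) (by simp)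
  simpa using this

-- ===== VERDICT (by name: the statement is the Claim_ definition above) =====
theorem rank_emails_py_spec : Claim_equal_rank_emails_py := by
  intro emails _
  show rank_emails_py emails = rank_emails_py_alt emails
  unfold rank_emails_py
  rw [pv_alt_eq]
  by_cases h : emails = []
  · subst h; simp
  · simp only [h, if_false]
    rw [pv_partition]
    simp
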